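-- pv_equiv track=rewrite | github.com/nipype/pydra | pydra/engine/helpers.py | position_adjustment
-- ===== SOURCE A (Python) =====
-- def position_adjustment(pos_args):
--     """
--     sorting elements with the first element - position,
--     the negative positions should go to the end of the list
--     everything that has no position (i.e. it's None),
--     should go between elements with positive positions an with negative pos.
--     Returns a list of sorted args.
--     """
--     # sorting all elements of the command
--     try:
--         pos_args.sort()
--     except TypeError:  # if some positions are None
--         pos_args_none = []
--         pos_args_int = []
--         for el in pos_args:
--             if el[0] is None:
--                 pos_args_none.append(el)
--             else:
--                 pos_args_int.append(el)
--             pos_args_int.sort()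
--         last_el = pos_args_int[-1][0]
--         for el_none in pos_args_none:
--             last_el += 1
--             pos_args_int.append((last_el, el_none[1]))
--         pos_args = pos_args_int
--
--     # if args available, they should be moved at the of the list
--     while pos_args[0][0] < 0:
--         pos_args.append(pos_args.pop(0))
--
--     # dropping the position index
--     cmd_args = []
--     for el in pos_args:
--         cmd_args += el[1]
--
--     return cmd_args
-- ===== SOURCE B (Python) =====
-- def position_adjustment(pos_args):
--     """Same result as A, computed with one sort and a stable sign partition
--     (no in-loop re-sorting, no pop(0) rotation)."""
--     ints = sorted(el for el in pos_args if el[0] is not None)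
--     nones = [el[1] for el in pos_args if el[0] is None]
--     last = ints[-1][0]
--     full = ints + [(last + 1 + i, args) for i, args in enumerate(nones)]
--     out = []
--     for p, args in full:
--         if p >= 0:
--             out += args
--     for p, args in full:
--         if p < 0:
--             out += args
--     return out
-- ===== Notes on version B (the rewrite author's own statement) =====
-- stated objective: faster
-- what changed: B partitions None/int positions in one pass, sorts the int-position elements once (A re-sorts the growing list inside its loop), assigns the None elements their positions by enumeration, and flattens with a stable sign partition (two filtered passes) instead of A's repeated pop(0)/append rotation.
import Mathlib
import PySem

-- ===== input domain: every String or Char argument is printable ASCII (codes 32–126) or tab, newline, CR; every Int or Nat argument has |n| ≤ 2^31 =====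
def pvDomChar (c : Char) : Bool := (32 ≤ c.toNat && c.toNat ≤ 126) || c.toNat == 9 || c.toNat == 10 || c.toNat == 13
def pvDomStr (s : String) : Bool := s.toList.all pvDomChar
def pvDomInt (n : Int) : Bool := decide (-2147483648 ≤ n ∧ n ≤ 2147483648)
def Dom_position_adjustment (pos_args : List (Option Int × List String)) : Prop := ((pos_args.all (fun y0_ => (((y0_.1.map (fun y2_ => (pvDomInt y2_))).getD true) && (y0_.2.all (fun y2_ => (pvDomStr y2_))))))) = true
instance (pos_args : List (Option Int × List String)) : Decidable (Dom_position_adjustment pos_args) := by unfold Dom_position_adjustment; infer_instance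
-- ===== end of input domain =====

-- B replaces A's in-loop re-sorting and pop(0)/append rotation by one sort plus a stable
-- sign partition.  A MUTATES its argument in place (sort/pop/append); the equivalence
-- proved here is about the RETURN value only — B does not mutate.

-- ===== PORT A =====
-- Sort key of Python's tuple comparison `(position, args)`: lexicographic on the int and
-- then on the list of strings; Python's `<` on str is `<` on `.toList` (PySem).  In every
-- list this key is applied to, the position is `some _` — `.getD 0` only totalizes.
def pvKey (el : Option Int × List String) : Lex (Int × List (List Char)) :=
  toLex (el.1.getD 0, el.2.map String.toList)

-- `while pos_args[0][0] < 0: pos_args.append(pos_args.pop(0))`.  Fuel (`= length` at the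
-- call site) suffices on every input admitted by Pre_; the `[]` case is Python's
-- IndexError on `pos_args[0]` and `.getD 0` its TypeError on `None < 0`, both outside Pre_.
def rotA (fuel : Nat) (l : List (Option Int × List String)) : List (Option Int × List String) :=
  match fuel with
  | 0 => l
  | n + 1 =>
    match l with
    | [] => []
    | el :: t => if el.1.getD 0 < 0 then rotA n (t ++ [el]) else el :: t

-- one iteration of A's `for el in pos_args:` loop — note Python re-sorts `pos_args_int`
-- on EVERY iteration, whichever branch was taken
def exceptStep (st : List (Option Int × List String) × List (Option Int × List String))
    (el : Option Int × List String) :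
    List (Option Int × List String) × List (Option Int × List String) :=
  let st' := if el.1.isNone then (st.1 ++ [el], st.2) else (st.1, st.2 ++ [el])
  (st'.1, PySem.List.sorted st'.2 pvKey)

def position_adjustment (pos_args : List (Option Int × List String)) : List String :=
  -- `pos_args.sort()` raises the caught TypeError exactly when the list mixes None and
  -- int positions; on the inputs admitted by Pre_ this branch condition coincides, and
  -- the failed sort leaves the None elements in their original relative order.
  let pos_args1 :=
    if pos_args.any (fun el => el.1.isNone) then
      let st := pos_args.foldl exceptStep ([], [])
      -- `pos_args_int[-1][0]`; the IndexError case (no int position) is outside Pre_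
      let last_el := ((PySem.List.pyGet? st.2 (-1)).map (fun el => el.1.getD 0)).getD 0
      (st.1.foldl
        (fun (acc : Int × List (Option Int × List String)) el_none =>
          (acc.1 + 1, acc.2 ++ [(some (acc.1 + 1), el_none.2)]))
        (last_el, st.2)).2
    else
      PySem.List.sorted pos_args pvKey
  (rotA pos_args1.length pos_args1).foldl (fun acc el => acc ++ el.2) []

-- ===== PORT B =====
def position_adjustment_alt (pos_args : List (Option Int × List String)) : List String :=
  let ints := PySem.List.sorted (pos_args.filter (fun el => !el.1.isNone)) pvKey
  let nones := (pos_args.filter (fun el => el.1.isNone)).map (fun el => el.2)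
  -- `ints[-1][0]`; the IndexError case is outside Pre_
  let last := ((PySem.List.pyGet? ints (-1)).map (fun el => el.1.getD 0)).getD 0
  -- positions stay wrapped in `some` so that `full` reuses the input's pair type
  let full := ints ++
    (PySem.List.enumerate nones).map
      (fun p => ((some (last + 1 + p.1), p.2) : Option Int × List String))
  let out := full.foldl (fun acc el => if 0 ≤ el.1.getD 0 then acc ++ el.2 else acc) ([] : List String)
  full.foldl (fun acc el => if el.1.getD 0 < 0 then acc ++ el.2 else acc) out

-- ===== PRECONDITION & SPEC =====
-- Pre_ excludes exactly (i) inputs on which A does not return: no int position at all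
-- (IndexError on `pos_args_int[-1]` / TypeError on `None < 0`) or greatest final position
-- negative (the rotation while-loop never terminates); and (ii) inputs whose first two
-- elements both have position None — A returns there, but the relative order of its None
-- block is an accident of how far the caught failing `list.sort()` got (timsort
-- internals); B keeps those elements in input order.
def Pre_position_adjustment (pos_args : List (Option Int × List String)) : Prop :=
  (∃ el ∈ pos_args, ∃ k : Int, el.1 = some k ∧
      0 ≤ k + (pos_args.countP (fun e => e.1.isNone) : Int)) ∧
  ¬ (2 ≤ pos_args.length ∧ (pos_args.take 2).all (fun e => e.1.isNone) = true)
instance (pos_args : List (Option Int × List String)) : Decidable (Pre_position_adjustment pos_args) := by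
  unfold Pre_position_adjustment; infer_instance

def pvWitness_position_adjustment : (List (Option Int × List String)) :=
  [(some 2, ["b"]), (none, ["c"]), (some (-1), ["a"])]

def Spec_position_adjustment (pos_args : List (Option Int × List String)) (out : List String) : Prop := out = position_adjustment_alt pos_args
instance (pos_args : List (Option Int × List String)) (out : List String) : Decidable (Spec_position_adjustment pos_args out) := by unfold Spec_position_adjustment; infer_instance

-- ===== CLAIM (what is proved, stated in full; the proofs are below) =====
def Claim_equal_position_adjustment : Prop := ∀ (pos_args : List (Option Int × List String)), Dom_position_adjustment pos_args → Pre_position_adjustment pos_args → Spec_position_adjustment pos_args (position_adjustment pos_args)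

-- ===== LEMMAS AND PROOFS =====

-- abbreviations for the intermediate values both ports compute
def pvPos (el : Option Int × List String) : Int := el.1.getD 0
def pvNeg (el : Option Int × List String) : Bool := decide (pvPos el < 0)
def pvInts (pos_args : List (Option Int × List String)) : List (Option Int × List String) :=
  PySem.List.sorted (pos_args.filter (fun el => !el.1.isNone)) pvKey
def pvLast (pos_args : List (Option Int × List String)) : Int :=
  ((PySem.List.pyGet? (pvInts pos_args) (-1)).map (fun el => el.1.getD 0)).getD 0
def pvFull (pos_args : List (Option Int × List String)) : List (Option Int × List String) :=
  pvInts pos_args ++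
    (PySem.List.enumerate ((pos_args.filter (fun el => el.1.isNone)).map (fun el => el.2))).map
      (fun p => ((some (pvLast pos_args + 1 + p.1), p.2) : Option Int × List String))

theorem pv_alt_eq (pos_args : List (Option Int × List String)) :
    position_adjustment_alt pos_args =
      (pvFull pos_args).foldl (fun acc el => if el.1.getD 0 < 0 then acc ++ el.2 else acc)
        ((pvFull pos_args).foldl (fun acc el => if 0 ≤ el.1.getD 0 then acc ++ el.2 else acc) []) := by
  rfl

theorem pv_foldB_ge (l : List (Option Int × List String)) (acc : List String) :
    l.foldl (fun acc el => if 0 ≤ el.1.getD 0 then acc ++ el.2 else acc) acc =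
      acc ++ (l.filter (fun el => !pvNeg el)).flatMap (fun el => el.2) := by
  induction l generalizing acc with
  | nil => simp
  | cons x t ih =>
    by_cases h : 0 ≤ x.1.getD 0
    · have : pvNeg x = false := by simp [pvNeg, pvPos]; omega
      simp [h, this, ih]
    · have : pvNeg x = true := by simp [pvNeg, pvPos]; omega
      simp [h, this, ih]

theorem pv_foldB_lt (l : List (Option Int × List String)) (acc : List String) :
    l.foldl (fun acc el => if el.1.getD 0 < 0 then acc ++ el.2 else acc) acc =
      acc ++ (l.filter pvNeg).flatMap (fun el => el.2) := by
  induction l generalizing acc with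
  | nil => simp
  | cons x t ih =>
    by_cases h : x.1.getD 0 < 0
    · have : pvNeg x = true := by simp [pvNeg, pvPos]; omega
      simp [h, this, ih]
    · have : pvNeg x = false := by simp [pvNeg, pvPos]; omega
      simp [h, this, ih]

theorem pv_rot_move : ∀ (A : List (Option Int × List String)) (b : Option Int × List String)
    (B' : List (Option Int × List String)) (fuel : Nat),
    (∀ a ∈ A, pvNeg a = true) → pvNeg b = false → A.length ≤ fuel →
    rotA fuel (A ++ b :: B') = (b :: B') ++ A := by
  intro A
  induction A with
  | nil =>
    intro b B' fuel _ hb _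
    cases fuel with
    | zero => simp [rotA]
    | succ n =>
      simp only [List.nil_append, rotA]
      have : ¬ (b.1.getD 0 < 0) := by simp [pvNeg, pvPos] at hb; omega
      simp [this]
  | cons a A' ih =>
    intro b B' fuel hA hb hlen
    cases fuel with
    | zero => simp at hlen
    | succ n =>
      have ha : a.1.getD 0 < 0 := by
        have := hA a (by simp)
        simp [pvNeg, pvPos] at this; omega
      simp only [List.cons_append, rotA, if_pos ha]
      have : (A' ++ b :: B') ++ [a] = A' ++ b :: (B' ++ [a]) := by simp
      rw [this, ih b (B' ++ [a]) n (fun x hx => hA x (by simp [hx])) hb (by simpa using hlen)]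
      simp

theorem pv_sorted_rot (l : List (Option Int × List String))
    (hp : l.Pairwise (fun a b => pvPos a ≤ pvPos b))
    (hex : ∃ el ∈ l, pvNeg el = false) :
    rotA l.length l = l.filter (fun el => !pvNeg el) ++ l.filter pvNeg := by
  have hsplit : l.takeWhile pvNeg ++ l.dropWhile pvNeg = l := List.takeWhile_append_dropWhile
  rcases hB : l.dropWhile pvNeg with _ | ⟨b, B'⟩
  · exfalso
    rcases hex with ⟨el, hmem, hel⟩
    have : el ∈ l.takeWhile pvNeg := by
      rw [← hsplit] at hmem; simpa [hB] using hmem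
    have := List.mem_takeWhile_imp this
    simp [this] at hel
  · have hbneg : pvNeg b = false := by
      have := List.head?_dropWhile_not pvNeg l
      rw [hB] at this; simpa using this
    have hAneg : ∀ a ∈ l.takeWhile pvNeg, pvNeg a = true := fun a ha => List.mem_takeWhile_imp ha
    -- every element of the dropWhile suffix is non-negative
    have hBpos : ∀ x ∈ b :: B', pvNeg x = false := by
      have hsub : (b :: B').Sublist l := by rw [← hB]; exact List.dropWhile_sublist _
      have hpB : (b :: B').Pairwise (fun a b => pvPos a ≤ pvPos b) := hp.sublist hsub
      intro x hx
      rcases List.mem_cons.mp hx with rfl | hx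
      · exact hbneg
      · have : pvPos b ≤ pvPos x := (List.pairwise_cons.mp hpB).1 x hx
        have hb0 : ¬ (pvPos b < 0) := by simpa [pvNeg] using hbneg
        simp [pvNeg]; omega
    have hfilt1 : l.filter (fun el => !pvNeg el) = b :: B' := by
      conv_lhs => rw [← hsplit, hB]
      rw [List.filter_append]
      have h1 : (l.takeWhile pvNeg).filter (fun el => !pvNeg el) = [] := by
        rw [List.filter_eq_nil_iff]
        intro a ha; simp [hAneg a ha]
      have h2 : (b :: B').filter (fun el => !pvNeg el) = b :: B' := by
        rw [List.filter_eq_self]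
        intro a ha; simp [hBpos a ha]
      rw [h1, h2]; simp
    have hfilt2 : l.filter pvNeg = l.takeWhile pvNeg := by
      conv_lhs => rw [← hsplit, hB]
      rw [List.filter_append]
      have h1 : (l.takeWhile pvNeg).filter pvNeg = l.takeWhile pvNeg :=
        List.filter_eq_self.mpr (fun a ha => hAneg a ha)
      have h2 : (b :: B').filter pvNeg = [] := by
        rw [List.filter_eq_nil_iff]
        intro a ha; simp [hBpos a ha]
      rw [h1, h2]; simp
    have hlen : (l.takeWhile pvNeg).length ≤ l.length := List.Sublist.length_le (List.takeWhile_sublist _)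
    calc rotA l.length l = rotA l.length (l.takeWhile pvNeg ++ b :: B') := by rw [← hB, hsplit]
      _ = (b :: B') ++ l.takeWhile pvNeg := pv_rot_move _ b B' l.length hAneg hbneg hlen
      _ = l.filter (fun el => !pvNeg el) ++ l.filter pvNeg := by rw [hfilt1, hfilt2]

theorem pv_sorted_absorb (xs ys : List (Option Int × List String)) :
    PySem.List.sorted (PySem.List.sorted xs pvKey ++ ys) pvKey =
      PySem.List.sorted (xs ++ ys) pvKey := by
  have h := PySem.List.sorted_sorted xs pvKey
  simp only [PySem.List.sorted] at h ⊢
  simp only [List.foldl_append]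
  rw [h]

theorem pv_except_invariant : ∀ (xs ns is_ : List (Option Int × List String)),
    xs.foldl exceptStep (ns, PySem.List.sorted is_ pvKey) =
      (ns ++ xs.filter (fun el => el.1.isNone),
        PySem.List.sorted (is_ ++ xs.filter (fun el => !el.1.isNone)) pvKey) := by
  intro xs
  induction xs with
  | nil => intro ns is_; simp
  | cons x t ih =>
    intro ns is_
    by_cases hx : x.1.isNone
    · have step : exceptStep (ns, PySem.List.sorted is_ pvKey) x =
          (ns ++ [x], PySem.List.sorted is_ pvKey) := by
        simp [exceptStep, hx, PySem.List.sorted_sorted]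
      rw [List.foldl_cons, step, ih (ns ++ [x]) is_]
      simp [hx]
    · have step : exceptStep (ns, PySem.List.sorted is_ pvKey) x =
          (ns, PySem.List.sorted (is_ ++ [x]) pvKey) := by
        simp [exceptStep, hx, pv_sorted_absorb]
      rw [List.foldl_cons, step, ih ns (is_ ++ [x])]
      have hx2 : x.1.isSome = true := by cases h : x.1 <;> simp_all
      simp [hx, hx2]

theorem pv_enumerate_map {α β : Type} (f : α → β) : ∀ (l : List α) (st : Int),
    PySem.List.enumerate (l.map f) st = (PySem.List.enumerate l st).map (fun p => (p.1, f p.2)) := by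
  intro l
  induction l with
  | nil => intro st; simp [PySem.List.enumerate]
  | cons x t ih => intro st; simp [PySem.List.enumerate, ih (st + 1)]

theorem pv_append_nones_aux : ∀ (ns : List (Option Int × List String)) (st c : Int)
    (L : List (Option Int × List String)),
    (ns.foldl (fun (acc : Int × List (Option Int × List String)) el_none =>
        (acc.1 + 1, acc.2 ++ [(some (acc.1 + 1), el_none.2)])) (c, L)).2 =
      L ++ (PySem.List.enumerate ns st).map
        (fun p => ((some (c + 1 + (p.1 - st)), p.2.2) : Option Int × List String)) := by
  intro ns
  induction ns with
  | nil => intro st c L; simp [PySem.List.enumerate]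
  | cons n t ih =>
    intro st c L
    rw [List.foldl_cons]
    show (t.foldl _ (c + 1, L ++ [(some (c + 1), n.2)])).2 = _
    rw [ih (st + 1) (c + 1) (L ++ [(some (c + 1), n.2)])]
    simp only [PySem.List.enumerate, List.map_cons]
    have hfun : (fun (p : Int × (Option Int × List String)) =>
          ((some (c + 1 + 1 + (p.1 - (st + 1))), p.2.2) : Option Int × List String)) =
        (fun p => ((some (c + 1 + (p.1 - st)), p.2.2) : Option Int × List String)) := by
      funext p
      congr 1
      ring_nf
    simp [hfun]

theorem pv_append_nones (ns : List (Option Int × List String)) (c : Int)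
    (L : List (Option Int × List String)) :
    (ns.foldl (fun (acc : Int × List (Option Int × List String)) el_none =>
        (acc.1 + 1, acc.2 ++ [(some (acc.1 + 1), el_none.2)])) (c, L)).2 =
      L ++ (PySem.List.enumerate ns).map
        (fun p => ((some (c + 1 + p.1), p.2.2) : Option Int × List String)) := by
  rw [pv_append_nones_aux ns 0 c L]
  congr 1
  apply List.map_congr_left
  intro p _
  congr 1
  ring_nf

theorem pv_key_le_pos {a b : Option Int × List String} (h : pvKey a ≤ pvKey b) :
    pvPos a ≤ pvPos b := by
  rw [Prod.Lex.le_iff] at h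
  simp only [pvKey, ofLex_toLex] at h
  rcases h with h | ⟨h, _⟩
  · exact le_of_lt h
  · exact le_of_eq h

theorem pv_pairwise_le_getLast {l : List (Option Int × List String)}
    (hp : l.Pairwise (fun a b => pvPos a ≤ pvPos b)) (hne : l ≠ []) :
    ∀ a ∈ l, pvPos a ≤ pvPos (l.getLast hne) := by
  induction l with
  | nil => simp at hne
  | cons x t ih =>
    intro a ha
    rcases List.pairwise_cons.mp hp with ⟨hx, ht⟩
    by_cases htne : t = []
    · subst htne
      simp at ha
      simp [ha, List.getLast]
    · have hlast : (x :: t).getLast hne = t.getLast htne := List.getLast_cons htne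
      rcases List.mem_cons.mp ha with rfl | ha
      · rw [hlast]
        exact hx _ (List.getLast_mem htne)
      · rw [hlast]
        exact ih ht htne a ha

theorem pv_pyGet_neg_one {l : List (Option Int × List String)} (h : l ≠ []) :
    PySem.List.pyGet? l (-1) = some (l.getLast h) := by
  have hlen : 1 ≤ l.length := List.length_pos_iff.mpr h
  simp only [PySem.List.pyGet?, PySem.List.pyIdx?]
  have h1 : ¬ ((0 : Int) ≤ -1) := by omega
  have h2 : (-(l.length : Int)) ≤ -1 := by omega
  rw [if_neg h1, if_pos h2]
  simp only [Option.bind_some]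
  have : ((-(-1 : Int)).toNat) = 1 := by decide
  rw [this, List.getLast_eq_getElem h, List.getElem?_eq_getElem (by omega)]

theorem pv_last_eq {pos_args : List (Option Int × List String)} (hne : pvInts pos_args ≠ []) :
    pvLast pos_args = pvPos ((pvInts pos_args).getLast hne) := by
  rw [pvLast, pv_pyGet_neg_one hne]
  rfl

-- the list A holds when the rotation starts equals B's `full` list
theorem pv_main_list (pos_args : List (Option Int × List String))
    (_hpre : Pre_position_adjustment pos_args) :
    position_adjustment pos_args =
      (rotA (pvFull pos_args).length (pvFull pos_args)).foldl (fun acc el => acc ++ el.2) [] := by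
  by_cases hany : pos_args.any (fun el => el.1.isNone) = true
  · have hst : pos_args.foldl exceptStep ([], []) =
        (pos_args.filter (fun el => el.1.isNone), pvInts pos_args) := by
      have h0 : ((([] : List (Option Int × List String)), ([] : List (Option Int × List String)))) =
          (([] : List (Option Int × List String)), PySem.List.sorted ([] : List (Option Int × List String)) pvKey) := rfl
      rw [h0, pv_except_invariant pos_args [] []]
      simp [pvInts]
    have hfull : ((pos_args.filter (fun el => el.1.isNone)).foldl
          (fun (acc : Int × List (Option Int × List String)) el_none =>
            (acc.1 + 1, acc.2 ++ [(some (acc.1 + 1), el_none.2)]))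
          (pvLast pos_args, pvInts pos_args)).2 = pvFull pos_args := by
      rw [pv_append_nones]
      rw [pvFull, pv_enumerate_map]
      simp [List.map_map, Function.comp]
    simp only [position_adjustment, hany, if_pos, hst]
    have hL : pvLast pos_args =
        (Option.map (fun el => el.1.getD 0) (PySem.List.pyGet? (pvInts pos_args) (-1))).getD 0 := rfl
    rw [← hL, hfull]
  · have hany' : pos_args.any (fun el => el.1.isNone) = false := by
      rw [← Bool.not_eq_true]; exact hany
    have hall : ∀ el ∈ pos_args, el.1.isNone = false := by
      intro el hel
      cases h : el.1.isNone
      · rfl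
      · exact absurd h (List.any_eq_false.mp hany' el hel)
    have h1 : pos_args.filter (fun el => !el.1.isNone) = pos_args :=
      List.filter_eq_self.mpr (fun a ha => by simp [hall a ha])
    have h2 : pos_args.filter (fun el => el.1.isNone) = [] :=
      List.filter_eq_nil_iff.mpr (fun a ha => by simp [hall a ha])
    simp only [position_adjustment, hany', Bool.false_eq_true, if_false]
    have : pvFull pos_args = PySem.List.sorted pos_args pvKey := by
      rw [pvFull, pvInts, h1, h2]
      simp
    rw [this]

theorem pv_full_pairwise (pos_args : List (Option Int × List String))
    (_hpre : Pre_position_adjustment pos_args) :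
    (pvFull pos_args).Pairwise (fun a b => pvPos a ≤ pvPos b) := by
  refine List.pairwise_append.mpr ⟨?_, ?_, ?_⟩
  · exact (PySem.List.sorted_pairwise _ pvKey).imp (fun h => pv_key_le_pos h)
  · rw [List.pairwise_map]
    refine (PySem.List.pairwise_lt_enumerate _ _).imp ?_
    intro p q h
    simp only [pvPos, Option.getD_some]
    omega
  · intro a ha b hb
    have hne : pvInts pos_args ≠ [] := List.ne_nil_of_mem ha
    have hale : pvPos a ≤ pvLast pos_args := by
      rw [pv_last_eq hne]
      exact pv_pairwise_le_getLast ((PySem.List.sorted_pairwise _ pvKey).imp (fun h => pv_key_le_pos h)) hne a ha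
    rcases List.mem_map.mp hb with ⟨p, hp, rfl⟩
    rcases (PySem.List.mem_enumerate_iff _ _ _).mp hp with ⟨k, hk, rfl⟩
    simp only [pvPos, Option.getD_some] at *
    omega

theorem pv_exists_in_tail (ns : List (List String)) (last : Int) (hlen : ns ≠ [])
    (h : 0 ≤ last + (ns.length : Int)) :
    ∃ el ∈ (PySem.List.enumerate ns).map
        (fun p => ((some (last + 1 + p.1), p.2) : Option Int × List String)),
      pvNeg el = false := by
  have hl : 0 < ns.length := List.length_pos_iff.mpr hlen
  have hidx : ns.length - 1 < ns.length := by omega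
  have hm : ((0 : Int) + ((ns.length - 1 : Nat) : Int), ns[ns.length - 1]) ∈ PySem.List.enumerate ns :=
    (PySem.List.mem_enumerate_iff _ _ _).mpr ⟨ns.length - 1, hidx, rfl⟩
  refine ⟨(some (last + 1 + ((0 : Int) + ((ns.length - 1 : Nat) : Int))), ns[ns.length - 1]),
    List.mem_map.mpr ⟨_, hm, rfl⟩, ?_⟩
  simp only [pvNeg, pvPos, Option.getD_some]
  simp only [decide_eq_false_iff_not, not_lt]
  omega

theorem pv_full_exists (pos_args : List (Option Int × List String))
    (hpre : Pre_position_adjustment pos_args) :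
    ∃ el ∈ pvFull pos_args, pvNeg el = false := by
  rcases hpre.1 with ⟨el, hel, k, hk, hsum⟩
  have helf : el ∈ pos_args.filter (fun el => !el.1.isNone) := by
    rw [List.mem_filter]
    exact ⟨hel, by simp [hk]⟩
  have hmem : el ∈ pvInts pos_args := (PySem.List.mem_sorted _ _ _ _).mpr helf
  have hne : pvInts pos_args ≠ [] := List.ne_nil_of_mem hmem
  have hkle : k ≤ pvLast pos_args := by
    rw [pv_last_eq hne]
    have h2 := pv_pairwise_le_getLast ((PySem.List.sorted_pairwise _ pvKey).imp (fun h => pv_key_le_pos h)) hne el hmem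
    simp only [pvPos, hk, Option.getD_some] at h2 ⊢
    exact h2
  have hcount : (pos_args.countP (fun e => e.1.isNone)) = (pos_args.filter (fun el => el.1.isNone)).length :=
    List.countP_eq_length_filter
  by_cases hc : pos_args.filter (fun el => el.1.isNone) = []
  · have hc0 : (pos_args.countP (fun e => e.1.isNone)) = 0 := by rw [hcount, hc]; rfl
    rw [hc0] at hsum
    refine ⟨el, ?_, ?_⟩
    · rw [pvFull]; exact List.mem_append_left _ hmem
    · simp only [pvNeg, pvPos, hk, Option.getD_some]
      simp; omega
  · have hnsne : (pos_args.filter (fun el => el.1.isNone)).map (fun el => el.2) ≠ [] := by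
      simpa using hc
    have hclen : (((pos_args.filter (fun el => el.1.isNone)).map (fun el => el.2)).length : Int) =
        (pos_args.countP (fun e => e.1.isNone) : Int) := by
      rw [List.length_map, hcount]
    have hsum2 : 0 ≤ pvLast pos_args +
        (((pos_args.filter (fun el => el.1.isNone)).map (fun el => el.2)).length : Int) := by
      rw [hclen]; omega
    rcases pv_exists_in_tail _ (pvLast pos_args) hnsne hsum2 with ⟨el2, hmem2, hneg2⟩
    exact ⟨el2, by rw [pvFull]; exact List.mem_append_right _ hmem2, hneg2⟩

-- ===== VERDICT (by name: the statement is the Claim_ definition above) =====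
theorem position_adjustment_spec : Claim_equal_position_adjustment := by
  intro pos_args _hdom hpre
  unfold Spec_position_adjustment
  rw [pv_main_list pos_args hpre,
      pv_sorted_rot (pvFull pos_args) (pv_full_pairwise pos_args hpre) (pv_full_exists pos_args hpre),
      pv_alt_eq, pv_foldB_ge, pv_foldB_lt]
  rw [PySem.List.foldl_append_eq_flatMap]
  simp [List.flatMap_append]
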